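-- pv_equiv track=rewrite | github.com/FabriceCh/FormatMyCode | src/tcl_formatter/align_slashes.py | find_blocks_positions
-- ===== SOURCE A (Python) =====
-- from typing import List
--
-- def find_blocks_positions(lines: List[str]):
--     current_block_start = None
--     blocks_positions = []
--     for i, line in enumerate(lines):
--         if line.endswith('\\\n'):
--             if current_block_start is None:
--                 current_block_start = i
--             else:
--                 continue
--         else:
--             if current_block_start is not None:
--                 blocks_positions.append([current_block_start, i])
--                 current_block_start = None
--             else:
--                 continue
--     return blocks_positions
-- ===== SOURCE B (Python) =====
-- def find_blocks_positions(lines):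
--     flags = [line.endswith('\\\n') for line in lines]
--     starts = [i for i, (p, c) in enumerate(zip([False] + flags, flags)) if c and not p]
--     ends = [i for i, (p, c) in enumerate(zip([False] + flags, flags)) if p and not c]
--     return [[s, e] for s, e in zip(starts, ends)]
-- ===== Notes on version B (the rewrite author's own statement) =====
-- stated objective: alternative
-- what changed: Replaced A's single-pass Optional-start state machine by staged passes: a flags list of endswith('\\\n') results, two transition-detection comprehensions extracting run starts and run ends by comparing each flag with its predecessor, and a final zip of starts with ends (zip truncation silently drops a run that reaches EOF, which A's state machine also omits).
import Mathlib
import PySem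

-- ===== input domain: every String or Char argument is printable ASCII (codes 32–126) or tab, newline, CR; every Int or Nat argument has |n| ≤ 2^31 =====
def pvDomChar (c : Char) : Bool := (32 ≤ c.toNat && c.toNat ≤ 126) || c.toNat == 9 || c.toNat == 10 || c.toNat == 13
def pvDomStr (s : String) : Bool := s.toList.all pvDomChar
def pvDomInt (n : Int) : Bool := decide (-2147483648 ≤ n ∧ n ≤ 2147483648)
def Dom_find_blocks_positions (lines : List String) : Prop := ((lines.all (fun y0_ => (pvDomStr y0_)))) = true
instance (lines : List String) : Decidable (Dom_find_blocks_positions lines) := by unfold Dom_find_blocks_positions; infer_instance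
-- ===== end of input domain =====

-- B replaces A's stateful single-pass scan by staged passes: a flags list, two
-- transition-detection passes giving run starts and run ends, and a final zip
-- (zip truncation drops an EOF-reaching run, as A does); alternative, same cost.

-- ===== PORT A =====
-- loop body of A: state = (current_block_start, blocks_positions)
def pvStepA (st : Option Int × List (List Int)) (p : Int × String) : Option Int × List (List Int) :=
  if PySem.Str.endswith p.2 "\\\n" then
    match st.1 with
    | none => (some p.1, st.2)
    | some _ => st
  else
    match st.1 with
    | some s => (none, st.2 ++ [[s, p.1]])
    | none => st

def find_blocks_positions (lines : List String) : List (List Int) :=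
  ((PySem.List.enumerate lines 0).foldl pvStepA (none, [])).2

-- ===== PORT B =====
def pvEnds (l : String) : Bool := PySem.Str.endswith l "\\\n"

-- Source B line by line: flags, the two transition comprehensions, the zipped result
def find_blocks_positions_alt (lines : List String) : List (List Int) :=
  let flags := lines.map pvEnds
  let pairs := PySem.List.enumerate ((false :: flags).zip flags) 0
  let starts := (pairs.filter (fun q => q.2.2 && !q.2.1)).map (fun q => q.1)
  let ends := (pairs.filter (fun q => q.2.1 && !q.2.2)).map (fun q => q.1)
  (starts.zip ends).map (fun q => [q.1, q.2])

-- ===== PRECONDITION & SPEC =====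
def Spec_find_blocks_positions (lines : List String) (out : List (List Int)) : Prop := out = find_blocks_positions_alt lines
instance (lines : List String) (out : List (List Int)) : Decidable (Spec_find_blocks_positions lines out) := by unfold Spec_find_blocks_positions; infer_instance

-- ===== CLAIM (what is proved, stated in full; the proofs are below) =====
def Claim_equal_find_blocks_positions : Prop := ∀ (lines : List String), Dom_find_blocks_positions lines → Spec_find_blocks_positions lines (find_blocks_positions lines)

-- ===== LEMMAS AND PROOFS =====

-- run starts / run ends of a flag list, given the previous flag p and offset i
def pvS : Bool → List Bool → Int → List Int
  | _, [], _ => []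
  | p, f :: rest, i => if f && !p then i :: pvS f rest (i + 1) else pvS f rest (i + 1)

def pvE : Bool → List Bool → Int → List Int
  | _, [], _ => []
  | p, f :: rest, i => if p && !f then i :: pvE f rest (i + 1) else pvE f rest (i + 1)

def pvZipPairs (a b : List Int) : List (List Int) := (a.zip b).map (fun q => [q.1, q.2])

theorem pvS_spec (fs : List Bool) : ∀ (p : Bool) (i : Int),
    ((PySem.List.enumerate ((p :: fs).zip fs) i).filter (fun q => q.2.2 && !q.2.1)).map
      (fun q => q.1) = pvS p fs i := by
  induction fs with
  | nil => intro p i; simp [PySem.List.enumerate_nil, pvS]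
  | cons f rest ih =>
    intro p i
    rw [show (p :: f :: rest).zip (f :: rest) = (p, f) :: (f :: rest).zip rest from rfl,
        PySem.List.enumerate_cons]
    by_cases h : (f && !p) = true
    · simp [h, pvS, ih]
    · simp [h, pvS, ih]

theorem pvE_spec (fs : List Bool) : ∀ (p : Bool) (i : Int),
    ((PySem.List.enumerate ((p :: fs).zip fs) i).filter (fun q => q.2.1 && !q.2.2)).map
      (fun q => q.1) = pvE p fs i := by
  induction fs with
  | nil => intro p i; simp [PySem.List.enumerate_nil, pvE]
  | cons f rest ih =>
    intro p i
    rw [show (p :: f :: rest).zip (f :: rest) = (p, f) :: (f :: rest).zip rest from rfl,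
        PySem.List.enumerate_cons]
    by_cases h : (p && !f) = true
    · simp [h, pvE, ih]
    · simp [h, pvE, ih]

theorem pv_key (xs : List String) :
    (∀ (i : Int) (acc : List (List Int)),
      ((PySem.List.enumerate xs i).foldl pvStepA (none, acc)).2 =
        acc ++ pvZipPairs (pvS false (xs.map pvEnds) i) (pvE false (xs.map pvEnds) i)) ∧
    (∀ (i s : Int) (acc : List (List Int)),
      ((PySem.List.enumerate xs i).foldl pvStepA (some s, acc)).2 =
        acc ++ pvZipPairs (s :: pvS true (xs.map pvEnds) i) (pvE true (xs.map pvEnds) i)) := by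
  induction xs with
  | nil => simp [PySem.List.enumerate_nil, pvS, pvE, pvZipPairs]
  | cons l rest ih =>
    obtain ⟨ih1, ih2⟩ := ih
    constructor
    · intro i acc
      rw [PySem.List.enumerate_cons, List.foldl_cons]
      by_cases hl : pvEnds l
      · have hstep : pvStepA (none, acc) (i, l) = (some i, acc) := by
          simp [pvStepA]; simp [pvEnds] at hl; simp [hl]
        rw [hstep, ih2]
        simp [pvS, pvE, hl]
      · have hstep : pvStepA (none, acc) (i, l) = (none, acc) := by
          simp [pvStepA]; simp [pvEnds] at hl; simp [hl]
        rw [hstep, ih1]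
        simp [pvS, pvE, hl]
    · intro i s acc
      rw [PySem.List.enumerate_cons, List.foldl_cons]
      by_cases hl : pvEnds l
      · have hstep : pvStepA (some s, acc) (i, l) = (some s, acc) := by
          simp [pvStepA]; simp [pvEnds] at hl; simp [hl]
        rw [hstep, ih2]
        simp [pvS, pvE, hl]
      · have hstep : pvStepA (some s, acc) (i, l) = (none, acc ++ [[s, i]]) := by
          simp [pvStepA]; simp [pvEnds] at hl; simp [hl]
        rw [hstep, ih1]
        simp [pvS, pvE, hl, pvZipPairs]
-- ===== VERDICT (by name: the statement is the Claim_ definition above) =====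
theorem find_blocks_positions_spec : Claim_equal_find_blocks_positions := by
  intro lines _
  unfold Spec_find_blocks_positions find_blocks_positions find_blocks_positions_alt
  rw [(pv_key lines).1 0 []]
  simp only [pvS_spec, pvE_spec, pvZipPairs, List.nil_append]
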